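-- pv_equiv track=rewrite | github.com/HermanBergstrom/TabICL_Experiments | plotting_scripts/experiments_plots.py | _select_reduced_labels
-- ===== SOURCE A (Python) =====
-- def _feature_group(label: str) -> str:
--     if label.startswith("image"):
--         return "image"
--     if label.startswith("concat"):
--         return "concat"
--     if label.startswith("tabular"):
--         return "tabular"
--     return label
--
-- def _reducer_style_key(label: str) -> str:
--     lowered = label.lower()
--     if "random_projection" in lowered or "_rp" in lowered:
--         return "rp"
--     if "ica" in lowered:
--         return "ica"
--     if "pca" in lowered:
--         return "pca"
--     return "none"
--
-- def _pick_canonical_label(labels: list[str], group: str, reducer: str) -> str | None: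
--     candidates = [
--         label for label in labels
--         if _feature_group(label) == group and _reducer_style_key(label) == reducer
--     ]
--     if not candidates:
--         return None
--
--     if group == "tabular" and reducer == "none":
--         preferred = ["tabular_only", "tabular_none", "tabular"]
--     elif group == "image" and reducer == "none":
--         preferred = ["image_only", "image_none", "image"]
--     elif group == "concat" and reducer == "none":
--         preferred = ["concat", "concat_none"]
--     else:
--         preferred = []
--
--     for candidate in preferred:
--         if candidate in candidates:
--             return candidate
--     return sorted(candidates)[0]
--
-- def _select_reduced_labels(labels: list[str], reducers: list[str]) -> list[str]:
--     selected: list[str] = []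
--
--     tabular = _pick_canonical_label(labels, "tabular", "none")
--     if tabular is not None:
--         selected.append(tabular)
--
--     for reducer in reducers:
--         for group in ["image", "concat"]:
--             label = _pick_canonical_label(labels, group, reducer)
--             if label is not None and label not in selected:
--                 selected.append(label)
--     return selected
-- ===== SOURCE B (Python) =====
-- def _feature_group(label: str) -> str:
--     if label.startswith("image"):
--         return "image"
--     if label.startswith("concat"):
--         return "concat"
--     if label.startswith("tabular"):
--         return "tabular"
--     return label
--
-- def _reducer_style_key(label: str) -> str:
--     lowered = label.lower()
--     if "random_projection" in lowered or "_rp" in lowered: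
--         return "rp"
--     if "ica" in lowered:
--         return "ica"
--     if "pca" in lowered:
--         return "pca"
--     return "none"
--
-- def _preferred(group: str, reducer: str) -> list[str]:
--     if group == "tabular" and reducer == "none":
--         return ["tabular_only", "tabular_none", "tabular"]
--     if group == "image" and reducer == "none":
--         return ["image_only", "image_none", "image"]
--     if group == "concat" and reducer == "none":
--         return ["concat", "concat_none"]
--     return []
--
-- def _select_reduced_labels(labels: list[str], reducers: list[str]) -> list[str]:
--     # One pass over labels: classify each label once and keep, per (group, reducer-style)
--     # bucket, only the running best candidate under the key (preferred-rank, label) —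
--     # a preferred label (earlier in its preferred list = smaller rank) beats any
--     # non-preferred one, and ties on rank are broken by the smaller string, which is
--     # exactly preferred-list-first / sorted(...)[0] tie-breaking.  No candidate lists,
--     # no sorting, and each label is classified once instead of once per query.
--     best: dict[tuple[str, str], tuple[int, str]] = {}
--     for label in labels:
--         bucket = (_feature_group(label), _reducer_style_key(label))
--         preferred = _preferred(*bucket)
--         rank = preferred.index(label) if label in preferred else len(preferred)
--         cand = (rank, label)
--         if bucket not in best or cand < best[bucket]:
--             best[bucket] = cand
--     selected: list[str] = []
--     for key in [("tabular", "none")] + [(g, r) for r in reducers for g in ("image", "concat")]: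
--         if key in best and best[key][1] not in selected:
--             selected.append(best[key][1])
--     return selected
-- ===== Notes on version B (the rewrite author's own statement) =====
-- stated objective: faster
-- what changed: B makes one pass over labels, classifying each label once and keeping per (feature-group, reducer-style) bucket only the minimum candidate under the key (preferred-rank, label) in a dict, so each selection is a dict lookup; A's per-query filter scan, preferred-list scan and sort are gone (the rank component reproduces the preferred-first tie-break, the string component reproduces sorted(...)[0]).
import Mathlib
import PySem

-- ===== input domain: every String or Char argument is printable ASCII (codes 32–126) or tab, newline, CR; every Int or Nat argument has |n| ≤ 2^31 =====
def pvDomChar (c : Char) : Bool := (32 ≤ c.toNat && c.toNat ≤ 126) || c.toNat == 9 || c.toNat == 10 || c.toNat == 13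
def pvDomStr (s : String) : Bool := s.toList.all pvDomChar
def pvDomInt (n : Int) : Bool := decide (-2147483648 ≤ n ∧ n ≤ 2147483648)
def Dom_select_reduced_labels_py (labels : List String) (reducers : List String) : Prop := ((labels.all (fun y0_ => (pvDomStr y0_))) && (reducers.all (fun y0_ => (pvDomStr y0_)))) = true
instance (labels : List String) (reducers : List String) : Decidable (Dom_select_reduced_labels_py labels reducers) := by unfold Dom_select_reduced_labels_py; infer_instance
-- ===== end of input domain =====

-- B replaces A's per-query filter + preferred-scan + sort with ONE pass over labels keeping,
-- per (group, reducer-style) bucket, only the minimum candidate under the key (preferred-rank, label);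
-- each label is classified once instead of once per query (objective: faster).


-- ===== PORT A =====
-- shared with port B (identical helper functions in both Python sources)
def pvFeatureGroup (label : String) : String :=
  if PySem.Str.startswith label "image" then "image"
  else if PySem.Str.startswith label "concat" then "concat"
  else if PySem.Str.startswith label "tabular" then "tabular"
  else label

def pvReducerStyleKey (label : String) : String :=
  let lowered := PySem.Str.lower label
  if PySem.Str.isIn "random_projection" lowered || PySem.Str.isIn "_rp" lowered then "rp"
  else if PySem.Str.isIn "ica" lowered then "ica"
  else if PySem.Str.isIn "pca" lowered then "pca"
  else "none"

def pvPickCanonicalLabel (labels : List String) (group : String) (reducer : String) : Option String :=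
  let candidates := labels.filter (fun l => pvFeatureGroup l == group && pvReducerStyleKey l == reducer)
  if candidates.isEmpty then none
  else
    let preferred : List String :=
      if group == "tabular" && reducer == "none" then ["tabular_only", "tabular_none", "tabular"]
      else if group == "image" && reducer == "none" then ["image_only", "image_none", "image"]
      else if group == "concat" && reducer == "none" then ["concat", "concat_none"]
      else []
    match preferred.find? (fun c => candidates.contains c) with
    | some c => some c
    | none => some ((PySem.List.sorted candidates (fun x => x) false).headD "")
    -- headD "" : sorted(candidates)[0]; the guard above makes candidates (hence the sorted list) nonempty

def select_reduced_labels_py (labels : List String) (reducers : List String) : List String :=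
  let selected : List String :=
    match pvPickCanonicalLabel labels "tabular" "none" with
    | some t => [t]
    | none => []
  reducers.foldl (fun selected reducer =>
    ["image", "concat"].foldl (fun selected group =>
      match pvPickCanonicalLabel labels group reducer with
      | some label => if !selected.contains label then selected ++ [label] else selected
      | none => selected) selected) selected

-- ===== PORT B =====
def pvPreferred (group : String) (reducer : String) : List String :=
  if group == "tabular" && reducer == "none" then ["tabular_only", "tabular_none", "tabular"]
  else if group == "image" && reducer == "none" then ["image_only", "image_none", "image"]
  else if group == "concat" && reducer == "none" then ["concat", "concat_none"]
  else []

-- preferred.index(label) if label in preferred else len(preferred)  (getD default unreachable: contains ⇒ index? is some)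
def pvRank (pref : List String) (l : String) : Nat :=
  if pref.contains l then (PySem.List.index? pref l).getD pref.length else pref.length

-- Python tuple '<' on (int, str)
def pvCandLt (a : Nat × String) (b : Nat × String) : Bool :=
  decide (a.1 < b.1) || (a.1 == b.1 && PySem.Chars.strLt a.2.toList b.2.toList)

-- one pass over labels: per bucket keep the minimum (rank, label)
def pvBestMap (labels : List String) : PySem.Dict (String × String) (Nat × String) :=
  labels.foldl (fun best l =>
    let bucket := (pvFeatureGroup l, pvReducerStyleKey l)
    let cand := (pvRank (pvPreferred bucket.1 bucket.2) l, l)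
    match best.get? bucket with
    | none => best.insert bucket cand
    | some w => if pvCandLt cand w then best.insert bucket cand else best) PySem.Dict.empty

def select_reduced_labels_py_alt (labels : List String) (reducers : List String) : List String :=
  let best := pvBestMap labels
  (("tabular", "none") :: reducers.flatMap (fun r => [("image", r), ("concat", r)])).foldl
    (fun selected key =>
      match best.get? key with
      | some w => if !selected.contains w.2 then selected ++ [w.2] else selected
      | none => selected) []

-- ===== PRECONDITION & SPEC =====
def Spec_select_reduced_labels_py (labels : List String) (reducers : List String) (out : List String) : Prop := out = select_reduced_labels_py_alt labels reducers
instance (labels : List String) (reducers : List String) (out : List String) : Decidable (Spec_select_reduced_labels_py labels reducers out) := by unfold Spec_select_reduced_labels_py; infer_instance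

-- ===== CLAIM (what is proved, stated in full; the proofs are below) =====
def Claim_equal_select_reduced_labels_py : Prop := ∀ (labels : List String) (reducers : List String), Dom_select_reduced_labels_py labels reducers → Spec_select_reduced_labels_py labels reducers (select_reduced_labels_py labels reducers)

-- ===== LEMMAS AND PROOFS =====

-- pvCandLt is the lexicographic strict order on Nat × String
theorem pvCandLt_eq_decide (a b : Nat × String) : pvCandLt a b = decide (toLex a < toLex b) := by
  simp [pvCandLt, Prod.Lex.lt_iff, PySem.Chars.strLt, String.lt_iff_toList_lt, beq_eq_decide]

theorem pvCandLt_false_iff (a b : Nat × String) : pvCandLt a b = false ↔ toLex b ≤ toLex a := by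
  simp [pvCandLt_eq_decide, not_lt]

theorem pvCandLt_irrefl (a : Nat × String) : pvCandLt a a = false :=
  (pvCandLt_false_iff a a).2 le_rfl

theorem pvCandLe_trans {a b c : Nat × String}
    (hab : pvCandLt b a = false) (hbc : pvCandLt c b = false) : pvCandLt c a = false :=
  (pvCandLt_false_iff c a).2 (le_trans ((pvCandLt_false_iff b a).1 hab) ((pvCandLt_false_iff c b).1 hbc))

theorem pvCandLt_antisymm {a b : Nat × String}
    (hab : pvCandLt a b = false) (hba : pvCandLt b a = false) : a = b := by
  have h := le_antisymm ((pvCandLt_false_iff b a).1 hba) ((pvCandLt_false_iff a b).1 hab)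
  simpa using congrArg ofLex h

-- the per-label key used by B
def pvKey (g r : String) (l : String) : Nat × String := (pvRank (pvPreferred g r) l, l)

-- B's min-update step restricted to one bucket
def pvUpd (g r : String) (w : Option (Nat × String)) (l : String) : Option (Nat × String) :=
  match w with
  | none => some (pvKey g r l)
  | some x => if pvCandLt (pvKey g r l) x then some (pvKey g r l) else some x

-- A's selection step (what B's selection step reduces to once the best map is resolved)
def pvStep (labels : List String) (selected : List String) (key : String × String) : List String :=
  match pvPickCanonicalLabel labels key.1 key.2 with
  | some label => if !selected.contains label then selected ++ [label] else selected
  | none => selected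

-- localize pvBestMap's fold to the lookup key
theorem get?_foldl_step (labels : List String)
    (d : PySem.Dict (String × String) (Nat × String)) (g r : String) :
    (labels.foldl (fun best l =>
      let bucket := (pvFeatureGroup l, pvReducerStyleKey l)
      let cand := (pvRank (pvPreferred bucket.1 bucket.2) l, l)
      match best.get? bucket with
      | none => best.insert bucket cand
      | some w => if pvCandLt cand w then best.insert bucket cand else best) d).get? (g, r)
    = labels.foldl (fun w l =>
        if pvFeatureGroup l == g && pvReducerStyleKey l == r then pvUpd g r w l else w)
        (d.get? (g, r)) := by
  induction labels generalizing d with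
  | nil => rfl
  | cons l t ih =>
    simp only [List.foldl_cons]
    rw [ih]
    congr 1
    by_cases hb : (pvFeatureGroup l, pvReducerStyleKey l) = (g, r)
    · have hg : pvFeatureGroup l = g := congrArg Prod.fst hb
      have hr : pvReducerStyleKey l = r := congrArg Prod.snd hb
      simp only [hg, hr, beq_self_eq_true, Bool.and_self, if_pos, pvUpd]
      cases hgd : d.get? (g, r) with
      | none => simp [PySem.Dict.get?_insert_self, pvKey]
      | some w =>
        simp only [pvKey]
        split
        · simp [PySem.Dict.get?_insert_self]
        · simp [hgd]
    · have hne : ¬ (pvFeatureGroup l == g && pvReducerStyleKey l == r) = true := by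
        intro h
        simp only [Bool.and_eq_true, beq_iff_eq] at h
        exact hb (by rw [h.1, h.2])
      rw [if_neg hne]
      have hnee : (g, r) ≠ (pvFeatureGroup l, pvReducerStyleKey l) := fun h => hb h.symm
      split
      · exact PySem.Dict.get?_insert_of_ne _ _ hnee
      · split
        · exact PySem.Dict.get?_insert_of_ne _ _ hnee
        · rfl

-- the min-fold over a list returns the key of a member (or the seed), minimal under pvCandLt
theorem minfold_spec (g r : String) :
    ∀ (cs : List String) (k : Nat × String),
      ∃ m, cs.foldl (pvUpd g r) (some k) = some m ∧
        (m = k ∨ ∃ y ∈ cs, m = pvKey g r y) ∧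
        pvCandLt k m = false ∧ ∀ y ∈ cs, pvCandLt (pvKey g r y) m = false := by
  intro cs
  induction cs with
  | nil =>
    intro k
    exact ⟨k, rfl, Or.inl rfl, pvCandLt_irrefl k, by simp⟩
  | cons l t ih =>
    intro k
    simp only [List.foldl_cons]
    cases hlt : pvCandLt (pvKey g r l) k with
    | true =>
      have hstep : pvUpd g r (some k) l = some (pvKey g r l) := by simp [pvUpd, hlt]
      rw [hstep]
      obtain ⟨m, hm, hmem, hle, hall⟩ := ih (pvKey g r l)
      refine ⟨m, hm, ?_, ?_, ?_⟩
      · rcases hmem with h | ⟨y, hy, hyk⟩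
        · exact Or.inr ⟨l, List.mem_cons_self .., h⟩
        · exact Or.inr ⟨y, List.mem_cons_of_mem _ hy, hyk⟩
      · -- m ≤ key l < k, hence m ≤ k
        have hkl : pvCandLt k (pvKey g r l) = false := by
          rw [pvCandLt_false_iff]
          rw [pvCandLt_eq_decide, decide_eq_true_eq] at hlt
          exact le_of_lt hlt
        exact pvCandLe_trans hle hkl
      · intro y hy
        rcases List.mem_cons.1 hy with h | h
        · subst h; exact hle
        · exact hall y h
    | false =>
      have hstep : pvUpd g r (some k) l = some k := by simp [pvUpd, hlt]
      rw [hstep]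
      obtain ⟨m, hm, hmem, hle, hall⟩ := ih k
      refine ⟨m, hm, ?_, hle, ?_⟩
      · rcases hmem with h | ⟨y, hy, hyk⟩
        · exact Or.inl h
        · exact Or.inr ⟨y, List.mem_cons_of_mem _ hy, hyk⟩
      · intro y hy
        rcases List.mem_cons.1 hy with h | h
        · subst h; exact pvCandLe_trans hle hlt
        · exact hall y h

-- rank ingredients
theorem pvRank_of_not_mem {pref : List String} {l : String} (h : l ∉ pref) :
    pvRank pref l = pref.length := by
  simp [pvRank, h]

theorem pvRank_of_mem {pref : List String} {l : String} (h : l ∈ pref) :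
    ∃ (hk : pvRank pref l < pref.length),
      pref[pvRank pref l] = l ∧ ∀ j (hj : j < pvRank pref l), pref[j]'(lt_trans hj hk) ≠ l := by
  obtain ⟨k, hk⟩ := Option.isSome_iff_exists.1 ((PySem.List.index?_isSome_iff pref l).2 h)
  have hk' : List.idxOf? l pref = some k := by
    simpa [PySem.List.index?_eq_idxOf?] using hk
  have hr : pvRank pref l = k := by
    simp [pvRank, h, hk']
  obtain ⟨hlt, hget, hmin⟩ := PySem.List.getElem_of_index?_eq_some hk
  exact hr ▸ ⟨hlt, hget, hmin⟩

-- A's pick on a nonempty candidate list is the pvCandLt-minimum of the candidates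
theorem pick_min (labels : List String) (g r : String)
    (h : labels.filter (fun l => pvFeatureGroup l == g && pvReducerStyleKey l == r) ≠ []) :
    ∃ a, pvPickCanonicalLabel labels g r = some a ∧
      a ∈ labels.filter (fun l => pvFeatureGroup l == g && pvReducerStyleKey l == r) ∧
      ∀ y ∈ labels.filter (fun l => pvFeatureGroup l == g && pvReducerStyleKey l == r),
        pvCandLt (pvKey g r y) (pvKey g r a) = false := by
  unfold pvPickCanonicalLabel
  set cs := labels.filter (fun l => pvFeatureGroup l == g && pvReducerStyleKey l == r) with hcs
  rw [if_neg (by simpa [List.isEmpty_iff] using h)]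
  have hpp : (if g == "tabular" && r == "none" then ["tabular_only", "tabular_none", "tabular"]
      else if g == "image" && r == "none" then ["image_only", "image_none", "image"]
      else if g == "concat" && r == "none" then ["concat", "concat_none"]
      else []) = pvPreferred g r := rfl
  rw [hpp]
  cases hf : (pvPreferred g r).find? (fun c => cs.contains c) with
  | some c =>
    obtain ⟨hcmem, as, bs, hsplit, hprev⟩ := List.find?_eq_some_iff_append.1 hf
    have hcin : c ∈ cs := by simpa using hcmem
    refine ⟨c, by simp only [hf], hcin, ?_⟩
    intro y hy
    have hcp : c ∈ pvPreferred g r := hsplit ▸ List.mem_append_right _ (List.mem_cons_self ..)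
    obtain ⟨hrc, hgc, hminc⟩ := pvRank_of_mem hcp
    -- rank c ≤ as.length (c sits at position as.length, and rank is the first occurrence)
    have hlenc : as.length < (pvPreferred g r).length := by
      rw [hsplit]; simp
    have hxc : (as ++ c :: bs)[as.length]'(by simp) = c := by simp
    have hatc : (pvPreferred g r)[as.length]'hlenc = c := (List.getElem_of_eq hsplit hlenc).trans hxc
    have hrc_le : pvRank (pvPreferred g r) c ≤ as.length := by
      by_contra hgt
      exact hminc as.length (by omega) hatc
    rw [pvCandLt_false_iff]
    by_cases hyp : y ∈ pvPreferred g r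
    · obtain ⟨hry, hgy, hminy⟩ := pvRank_of_mem hyp
      rcases Nat.lt_trichotomy (pvRank (pvPreferred g r) c) (pvRank (pvPreferred g r) y) with hlt | heq | hgt
      · exact le_of_lt (Prod.Lex.lt_iff.2 (Or.inl hlt))
      · have hgc' := hgc
        simp only [heq] at hgc'
        have hceq : c = y := hgc'.symm.trans hgy
        rw [Prod.Lex.le_iff]
        exact Or.inr ⟨heq, le_of_eq hceq⟩
      · -- rank y < rank c ≤ as.length ⇒ y occurs in as ⇒ y ∉ cs, contradiction
        exfalso
        have hylt : pvRank (pvPreferred g r) y < as.length := lt_of_lt_of_le hgt hrc_le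
        have hy' := (List.getElem_of_eq hsplit hry).symm.trans hgy
        rw [List.getElem_append_left hylt] at hy'
        have hin : y ∈ as := hy' ▸ List.getElem_mem _
        have hncs : y ∉ cs := by simpa using hprev y hin
        exact hncs hy
    · refine le_of_lt (Prod.Lex.lt_iff.2 (Or.inl ?_))
      show (pvKey g r c).1 < (pvKey g r y).1
      simp only [pvKey]
      rw [pvRank_of_not_mem hyp]
      exact hrc
  | none =>
    -- no preferred candidate: sorted head is the plain string minimum; all ranks are maximal
    have hnone : ∀ p ∈ pvPreferred g r, p ∉ cs := by
      intro p hp hpin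
      have hc := List.find?_eq_none.1 hf p hp
      simp at hc
      exact hc hpin
    cases hs : PySem.List.sorted cs (fun x => x) false with
    | nil => exact absurd ((PySem.List.sorted_eq_nil_iff cs _ false).1 hs) h
    | cons m t' =>
      have hmem : m ∈ cs := by
        rw [← PySem.List.mem_sorted cs (fun x => x) false]
        rw [hs]; exact List.mem_cons_self ..
      refine ⟨m, by simp only [hf, hs]; rfl, hmem, ?_⟩
      intro y hy
      have hym : ¬ y ∈ pvPreferred g r := fun hp => hnone y hp hy
      have hmm : ¬ m ∈ pvPreferred g r := fun hp => hnone m hp hmem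
      rw [pvCandLt_false_iff, Prod.Lex.le_iff]
      refine Or.inr ⟨?_, ?_⟩
      · show (pvKey g r m).1 = (pvKey g r y).1
        simp [pvKey, pvRank_of_not_mem hym, pvRank_of_not_mem hmm]
      · exact PySem.List.key_head_sorted_le cs (fun x => x) hs y hy

-- main per-bucket bridge: the best map's entry is A's pick (tagged with its rank)
theorem get?_pvBestMap (labels : List String) (g r : String) :
    (pvBestMap labels).get? (g, r)
      = (pvPickCanonicalLabel labels g r).map (fun a => pvKey g r a) := by
  unfold pvBestMap
  rw [get?_foldl_step, PySem.Dict.get?_empty, ← List.foldl_filter]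
  cases hh : labels.filter (fun l => pvFeatureGroup l == g && pvReducerStyleKey l == r) with
  | nil =>
    have hpick : pvPickCanonicalLabel labels g r = none := by
      simp [pvPickCanonicalLabel, hh]
    rw [hpick]; rfl
  | cons c t =>
    obtain ⟨a, hpick, hamem, hamin⟩ := pick_min labels g r (by rw [hh]; simp)
    rw [hh] at hamem hamin
    simp only [List.foldl_cons]
    have hstep : pvUpd g r none c = some (pvKey g r c) := rfl
    rw [hstep]
    obtain ⟨m, hm, hmem, hle, hall⟩ := minfold_spec g r t (pvKey g r c)
    rw [hm, hpick]
    have hmkey : ∃ y ∈ c :: t, m = pvKey g r y := by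
      rcases hmem with h | ⟨y, hy, hyk⟩
      · exact ⟨c, List.mem_cons_self .., h⟩
      · exact ⟨y, List.mem_cons_of_mem _ hy, hyk⟩
    obtain ⟨y₀, hy₀, hy₀k⟩ := hmkey
    -- m ≤ key a (B's minimality at a) and key a ≤ m (A's minimality at y₀): equal
    have h1 : pvCandLt (pvKey g r a) m = false := by
      rcases List.mem_cons.1 hamem with h | h
      · exact h ▸ hle
      · exact hall a h
    have h2 : pvCandLt m (pvKey g r a) = false := hy₀k ▸ hamin y₀ hy₀
    rw [pvCandLt_antisymm h2 h1]
    rfl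

-- B's selection step equals A's selection step, pointwise
theorem step_eq (labels : List String) (selected : List String) (key : String × String) :
    (match (pvBestMap labels).get? key with
     | some w => if !selected.contains w.2 then selected ++ [w.2] else selected
     | none => selected)
    = pvStep labels selected key := by
  rcases key with ⟨g, r⟩
  rw [get?_pvBestMap]
  unfold pvStep
  cases pvPickCanonicalLabel labels g r <;> simp [pvKey]

-- ===== VERDICT (by name: the statement is the Claim_ definition above) =====
theorem select_reduced_labels_py_spec : Claim_equal_select_reduced_labels_py := by
  intro labels reducers _
  unfold Spec_select_reduced_labels_py
  simp only [select_reduced_labels_py, select_reduced_labels_py_alt]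
  have hf : (fun (selected : List String) (key : String × String) =>
      match (pvBestMap labels).get? key with
      | some w => if !selected.contains w.2 then selected ++ [w.2] else selected
      | none => selected)
    = pvStep labels := by
    funext selected key
    exact step_eq labels selected key
  rw [hf, List.foldl_cons, List.foldl_flatMap]
  have h0 : pvStep labels [] ("tabular", "none")
      = (match pvPickCanonicalLabel labels "tabular" "none" with
         | some t => [t]
         | none => ([] : List String)) := by
    unfold pvStep
    cases pvPickCanonicalLabel labels "tabular" "none" <;> rfl
  rw [h0]
  have hstep2 : (fun (acc : List String) (x : String) =>
        List.foldl (pvStep labels) acc [("image", x), ("concat", x)])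
      = (fun (selected : List String) (reducer : String) =>
        ["image", "concat"].foldl (fun selected group =>
          match pvPickCanonicalLabel labels group reducer with
          | some label => if !selected.contains label then selected ++ [label] else selected
          | none => selected) selected) := by
    funext acc x
    simp only [List.foldl_cons, List.foldl_nil, pvStep]
  rw [hstep2]
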